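-- pv_equiv track=rewrite | github.com/pfchopz/Codilty | Lesson 5.4.py | solution
-- ===== SOURCE A (Python) =====
-- def solution(A):
--     # write your code in Python 3.6
--     zeroCount = 0
--     totalPairs = 0
--
--     for i in A:
--         if i == 0:
--             zeroCount += 1
--         else:
--             totalPairs += (1 * zeroCount)
--
--     if totalPairs > 1000000000:
--         totalPairs = -1
--
--     return totalPairs
-- ===== SOURCE B (Python) =====
-- def solution(A):
--     # Count ones-after-each-zero instead of zeros-before-each-one:
--     # first total the non-zero elements, then for each zero add the
--     # number of non-zeros still to its right.
--     onesRemaining = sum(1 for x in A if x != 0)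
--     totalPairs = 0
--     for x in A:
--         if x != 0:
--             onesRemaining -= 1
--         else:
--             totalPairs += onesRemaining
--     if totalPairs > 1000000000:
--         totalPairs = -1
--     return totalPairs
-- ===== Notes on version B (the rewrite author's own statement) =====
-- stated objective: alternative
-- what changed: Instead of accumulating zeros-seen-so-far and adding that count at each non-zero, B pre-counts the non-zero elements and, for each zero, adds the number of non-zeros that come after it; same cap applied at the end.
import Mathlib
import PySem

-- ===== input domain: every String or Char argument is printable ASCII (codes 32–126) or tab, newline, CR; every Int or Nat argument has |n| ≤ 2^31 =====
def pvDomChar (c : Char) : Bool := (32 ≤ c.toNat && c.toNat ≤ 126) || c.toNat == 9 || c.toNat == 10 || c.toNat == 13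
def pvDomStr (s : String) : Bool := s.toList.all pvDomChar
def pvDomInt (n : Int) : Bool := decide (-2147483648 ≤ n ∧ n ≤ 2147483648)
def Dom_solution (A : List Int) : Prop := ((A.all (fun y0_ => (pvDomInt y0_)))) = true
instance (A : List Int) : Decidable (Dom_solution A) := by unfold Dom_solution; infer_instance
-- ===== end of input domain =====

-- B counts, for each zero, the non-zeros after it (pre-counting non-zeros once),
-- instead of A's zeros-before-each-non-zero accumulation; same end cap.

-- ===== PORT A =====
-- loop body of A: state (zeroCount, totalPairs)
def solutionLoop : List Int → Int → Int → Int
  | [], _, totalPairs => totalPairs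
  | i :: rest, zeroCount, totalPairs =>
      if i = 0 then solutionLoop rest (zeroCount + 1) totalPairs
      else solutionLoop rest zeroCount (totalPairs + 1 * zeroCount)

def solution (A : List Int) : Int :=
  let totalPairs := solutionLoop A 0 0
  if totalPairs > 1000000000 then -1 else totalPairs

-- ===== PORT B =====
-- sum(1 for x in A if x != 0)
def countNonzero : List Int → Int
  | [] => 0
  | x :: rest => (if x ≠ 0 then 1 else 0) + countNonzero rest

-- loop body of B: state (onesRemaining, totalPairs)
def altLoop : List Int → Int → Int → Int
  | [], _, totalPairs => totalPairs
  | x :: rest, onesRemaining, totalPairs =>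
      if x ≠ 0 then altLoop rest (onesRemaining - 1) totalPairs
      else altLoop rest onesRemaining (totalPairs + onesRemaining)

def solution_alt (A : List Int) : Int :=
  let totalPairs := altLoop A (countNonzero A) 0
  if totalPairs > 1000000000 then -1 else totalPairs

-- ===== PRECONDITION & SPEC =====
def Spec_solution (A : List Int) (out : Int) : Prop := out = solution_alt A
instance (A : List Int) (out : Int) : Decidable (Spec_solution A out) := by unfold Spec_solution; infer_instance

-- ===== CLAIM (what is proved, stated in full; the proofs are below) =====
def Claim_equal_solution : Prop := ∀ (A : List Int), Dom_solution A → Spec_solution A (solution A)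

-- ===== LEMMAS AND PROOFS =====

-- B's totalPairs accumulator is additive
theorem altLoop_acc (l : List Int) (n t : Int) :
    altLoop l n t = t + altLoop l n 0 := by
  induction l generalizing n t with
  | nil => simp [altLoop]
  | cons x rest ih =>
    by_cases hx : x = 0 <;> simp [altLoop, hx]
    · rw [ih n (t + n), ih n n]; ring
    · exact ih (n - 1) t

theorem loops_eq (l : List Int) (zc t : Int) :
    solutionLoop l zc t = t + zc * countNonzero l + altLoop l (countNonzero l) 0 := by
  induction l generalizing zc t with
  | nil => simp [solutionLoop, countNonzero, altLoop]
  | cons x rest ih =>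
    by_cases hx : x = 0
    · simp only [solutionLoop, countNonzero, altLoop, hx]
      norm_num
      rw [ih (zc + 1) t, altLoop_acc rest (countNonzero rest) (countNonzero rest)]
      ring
    · simp only [solutionLoop, countNonzero, altLoop, hx]
      norm_num [hx]
      rw [ih zc (t + zc)]
      ring

-- ===== VERDICT (by name: the statement is the Claim_ definition above) =====
theorem solution_spec : Claim_equal_solution := by
  intro A _
  unfold Spec_solution solution solution_alt
  rw [loops_eq A 0 0]
  simp
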